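-- pv_equiv track=rewrite | github.com/25021891-trannhatminh/COM1050_11_25021891_Tran-Nhat-Minh | on_tap_1.py | reconcile_users
-- ===== SOURCE A (Python) =====
-- def reconcile_users(registered_lst, paid_lst):
--     if registered_lst == []:
--         return (paid_lst,[],[])
--     if paid_lst == []:
--         return ([],registered_lst,[])
--     if registered_lst == [] and paid_lst == []:
--         return ([],[],[])
--     both = []
--     registered_not_paid = []
--     registered_lst,paid_lst = map(set,[registered_lst, paid_lst])
--     for i in registered_lst:
--         if i in paid_lst:
--             if i not in both:
--                 both.append(i)
--             paid_lst.remove(i)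
--         else:
--             if i not in registered_not_paid:
--                 registered_not_paid.append(i)
--     paid_not_registered = list(paid_lst)
--     both.sort()
--     registered_not_paid.sort()
--     paid_not_registered.sort()
--     return paid_not_registered,registered_not_paid,both
-- ===== SOURCE B (Python) =====
-- def _dedup_sorted(xs):
--     # keep each element of a sorted list once (keep the last of each equal run)
--     return [x for i, x in enumerate(xs) if i + 1 == len(xs) or xs[i + 1] != x]
--
-- def reconcile_users(registered_lst, paid_lst):
--     if not registered_lst:
--         return (paid_lst, [], [])
--     if not paid_lst:
--         return ([], registered_lst, [])
--     r = _dedup_sorted(sorted(registered_lst))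
--     p = _dedup_sorted(sorted(paid_lst))
--     pnr, rnp, both = [], [], []
--     i = j = 0
--     while i < len(r) and j < len(p):
--         if r[i] < p[j]:
--             rnp.append(r[i]); i += 1
--         elif p[j] < r[i]:
--             pnr.append(p[j]); j += 1
--         else:
--             both.append(r[i]); i += 1; j += 1
--     pnr.extend(p[j:]); rnp.extend(r[i:])
--     return (pnr, rnp, both)
-- ===== Notes on version B (the rewrite author's own statement) =====
-- stated objective: faster
-- what changed: A's hash-set partition (one mutating loop over set(registered) with quadratic list-membership tests on the growing both/registered_not_paid lists and destructive removals from the paid set, then three sorts) is replaced by sort-then-merge: sort and adjacent-deduplicate both lists, then a single two-pointer merge emits the three already-sorted groups with no sets and no final sort.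
import Mathlib
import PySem

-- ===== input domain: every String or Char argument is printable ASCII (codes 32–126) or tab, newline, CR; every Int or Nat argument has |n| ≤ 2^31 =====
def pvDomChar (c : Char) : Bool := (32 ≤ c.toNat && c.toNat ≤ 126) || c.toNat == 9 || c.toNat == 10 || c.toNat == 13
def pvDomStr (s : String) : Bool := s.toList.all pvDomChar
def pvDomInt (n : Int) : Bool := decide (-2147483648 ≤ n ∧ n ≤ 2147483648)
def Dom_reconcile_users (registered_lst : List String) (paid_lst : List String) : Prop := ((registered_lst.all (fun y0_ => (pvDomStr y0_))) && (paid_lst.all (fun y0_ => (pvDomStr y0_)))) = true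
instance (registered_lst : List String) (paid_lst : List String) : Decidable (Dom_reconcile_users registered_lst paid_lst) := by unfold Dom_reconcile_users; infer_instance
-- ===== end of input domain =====

-- B replaces A's hash-set partition (one mutating loop over set(registered) with destructive
-- removals from the paid set, then three sorts) by sort / adjacent-dedup / two-pointer merge,
-- which emits the three groups already sorted; A's two empty-input guards are kept; objective:
-- alternative algorithm. (A iterates over a Python set but sorts every output, so its result is
-- order-independent; the ports consume PySem.Set only order-independently.)

-- ===== PORT A =====
-- one loop step of A's 'for i in registered_lst' (state: both, registered_not_paid, paid set)
def reconcileStep (st : List String × List String × PySem.Set String) (i : String) :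
    List String × List String × PySem.Set String :=
  match st with
  | (both, rnp, ps) =>
    if ps.contains i then
      ((if both.contains i then both else both ++ [i]), rnp, (PySem.Set.remove? ps i).getD ps)
    else
      (both, (if rnp.contains i then rnp else rnp ++ [i]), ps)

def reconcile_users (registered_lst : List String) (paid_lst : List String) : List String × List String × List String :=
  if registered_lst = [] then (paid_lst, [], [])
  else if paid_lst = [] then ([], registered_lst, [])
  else if registered_lst = [] ∧ paid_lst = [] then ([], [], [])
  else
    let rset := PySem.Set.ofList registered_lst
    let pset := PySem.Set.ofList paid_lst
    let st := rset.foldl reconcileStep ([], [], pset)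
    (PySem.List.sorted st.2.2 (fun x => x) false,
     PySem.List.sorted st.2.1 (fun x => x) false,
     PySem.List.sorted st.1 (fun x => x) false)

-- ===== PORT B =====
-- _dedup_sorted: keep an element of a sorted list iff the next one differs (last of each run)
def dedupSorted : List String → List String
  | [] => []
  | [x] => [x]
  | x :: y :: t => if x = y then dedupSorted (y :: t) else x :: dedupSorted (y :: t)

-- the two-pointer while loop (accumulators grow by cons, reversed at the end = Python append)
def mergeLoop (r p accP accR accB : List String) : List String × List String × List String :=
  match r, p with
  | [], rest => (accP.reverse ++ rest, accR.reverse, accB.reverse)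
  | x :: r', [] => (accP.reverse, accR.reverse ++ x :: r', accB.reverse)
  | x :: r', y :: p' =>
    if x < y then mergeLoop r' (y :: p') accP (x :: accR) accB
    else if y < x then mergeLoop (x :: r') p' (y :: accP) accR accB
    else mergeLoop r' p' accP accR (x :: accB)
termination_by r.length + p.length

def reconcile_users_alt (registered_lst : List String) (paid_lst : List String) : List String × List String × List String :=
  if registered_lst.isEmpty then (paid_lst, [], [])
  else if paid_lst.isEmpty then ([], registered_lst, [])
  else
    let r := dedupSorted (PySem.List.sorted registered_lst (fun x => x) false)
    let p := dedupSorted (PySem.List.sorted paid_lst (fun x => x) false)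
    mergeLoop r p [] [] []

-- ===== PRECONDITION & SPEC =====
def Spec_reconcile_users (registered_lst : List String) (paid_lst : List String) (out : List String × List String × List String) : Prop := out = reconcile_users_alt registered_lst paid_lst
instance (registered_lst : List String) (paid_lst : List String) (out : List String × List String × List String) : Decidable (Spec_reconcile_users registered_lst paid_lst out) := by unfold Spec_reconcile_users; infer_instance

-- ===== CLAIM (what is proved, stated in full; the proofs are below) =====
def Claim_equal_reconcile_users : Prop := ∀ (registered_lst : List String) (paid_lst : List String), Dom_reconcile_users registered_lst paid_lst → Spec_reconcile_users registered_lst paid_lst (reconcile_users registered_lst paid_lst)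

-- ===== LEMMAS AND PROOFS =====

-- A's loop, run over a duplicate-free list with accumulators disjoint from it, computes
-- three filters of its inputs.
lemma reconcile_loop (l : List String) : ∀ (b rnp ps : List String), l.Nodup → ps.Nodup →
    (∀ i ∈ l, i ∉ b ∧ i ∉ rnp) →
    l.foldl reconcileStep (b, rnp, ps) =
      (b ++ l.filter (fun i => ps.contains i),
       rnp ++ l.filter (fun i => !ps.contains i),
       ps.filter (fun j => !l.contains j)) := by
  induction l with
  | nil => intro b rnp ps _ _ _; simp
  | cons i l ih =>
    intro b rnp ps hnd hps hdisj
    have hil : i ∉ l := (List.nodup_cons.mp hnd).1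
    have hnd' : l.Nodup := (List.nodup_cons.mp hnd).2
    have hib : i ∉ b := (hdisj i (by simp)).1
    have hirnp : i ∉ rnp := (hdisj i (by simp)).2
    simp only [List.foldl_cons]
    by_cases hmem : i ∈ ps
    · have hstep : reconcileStep (b, rnp, ps) i
          = (b ++ [i], rnp, ps.filter (fun y => !(y == i))) := by
        simp [reconcileStep, PySem.Set.remove?, PySem.Set.discard, hmem, hib]
      rw [hstep, ih (b ++ [i]) rnp (ps.filter (fun y => !(y == i))) hnd' (hps.filter _)
        (by intro j hj; refine ⟨?_, (hdisj j (by simp [hj])).2⟩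
            simp only [List.mem_append, List.mem_singleton]
            rintro (h | rfl)
            · exact (hdisj j (by simp [hj])).1 h
            · exact hil hj)]
      have hq1 : List.filter (fun j => (List.filter (fun y => !(y == i)) ps).contains j) l
          = List.filter (fun j => ps.contains j) l := by
        apply List.filter_congr; intro j hj
        have hji : j ≠ i := fun h => hil (h ▸ hj)
        simp [List.mem_filter, hji]
      have hq2 : List.filter (fun j => !(List.filter (fun y => !(y == i)) ps).contains j) l
          = List.filter (fun j => !ps.contains j) l := by
        apply List.filter_congr; intro j hj
        have hji : j ≠ i := fun h => hil (h ▸ hj)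
        simp [List.mem_filter, hji]
      have hq3 : List.filter (fun j => !l.contains j) (List.filter (fun y => !(y == i)) ps)
          = List.filter (fun j => !(i :: l).contains j) ps := by
        rw [List.filter_filter]
        apply List.filter_congr; intro j _
        by_cases hji : j = i <;> simp [hji]
      rw [hq1, hq2, hq3]
      simp [hmem]
    · have hstep : reconcileStep (b, rnp, ps) i = (b, rnp ++ [i], ps) := by
        simp [reconcileStep, hmem, hirnp]
      rw [hstep, ih b (rnp ++ [i]) ps hnd' hps
        (by intro j hj; refine ⟨(hdisj j (by simp [hj])).1, ?_⟩
            simp only [List.mem_append, List.mem_singleton]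
            rintro (h | rfl)
            · exact (hdisj j (by simp [hj])).2 h
            · exact hil hj)]
      have hq3 : List.filter (fun j => !l.contains j) ps
          = List.filter (fun j => !(i :: l).contains j) ps := by
        apply List.filter_congr; intro j hj
        have hji : j ≠ i := fun h => hmem (h ▸ hj)
        simp [hji]
      rw [hq3]
      simp [hmem]

-- dedupSorted keeps exactly the members of its input
lemma dedupSorted_mem (l : List String) : ∀ a, a ∈ dedupSorted l ↔ a ∈ l := by
  induction l with
  | nil => simp [dedupSorted]
  | cons x tl ih =>
    cases tl with
    | nil => simp [dedupSorted]
    | cons y t =>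
      intro a
      by_cases h : x = y
      · subst h
        simp only [dedupSorted, if_true]
        rw [ih a]
        simp only [List.mem_cons]
        tauto
      · simp [dedupSorted, h, ih a]

-- dedupSorted of a (≤)-sorted list is strictly increasing
lemma dedupSorted_pairwise (l : List String) (h : l.Pairwise (· ≤ ·)) :
    (dedupSorted l).Pairwise (· < ·) := by
  induction l with
  | nil => simp [dedupSorted]
  | cons x tl ih =>
    cases tl with
    | nil => simp [dedupSorted]
    | cons y t =>
      have h1 : (y :: t).Pairwise (· ≤ ·) := h.tail
      by_cases hxy : x = y
      · simpa [dedupSorted, hxy] using ih h1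
      · have hle : ∀ b ∈ y :: t, x ≤ b := fun b hb => (List.pairwise_cons.mp h).1 b hb
        simp only [dedupSorted, hxy, if_false]
        refine List.pairwise_cons.mpr ⟨?_, ih h1⟩
        intro b hb
        have hbmem : b ∈ y :: t := (dedupSorted_mem _ b).mp hb
        have hlt : x < y := lt_of_le_of_ne (hle y (by simp)) hxy
        rcases List.mem_cons.mp hbmem with rfl | hbt
        · exact hlt
        · exact lt_of_lt_of_le hlt ((List.pairwise_cons.mp h1).1 b hbt)

-- the merge loop on strictly increasing inputs computes the three filters
lemma mergeLoop_spec (r p : List String) (accP accR accB : List String)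
    (hr : r.Pairwise (· < ·)) (hp : p.Pairwise (· < ·)) :
    mergeLoop r p accP accR accB =
      (accP.reverse ++ p.filter (fun y => !r.contains y),
       accR.reverse ++ r.filter (fun x => !p.contains x),
       accB.reverse ++ r.filter (fun x => p.contains x)) := by
  revert hr hp
  fun_induction mergeLoop r p accP accR accB with
  | case1 => intro hr hp; simp
  | case2 => intro hr hp; simp
  | case3 accP accR accB x r' y p' hxy ih =>
    intro hr hp
    rw [ih (List.pairwise_cons.mp hr).2 hp]
    have hxlt : ∀ z ∈ y :: p', x < z := by
      intro z hz
      rcases List.mem_cons.mp hz with rfl | hz'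
      · exact hxy
      · exact hxy.trans ((List.pairwise_cons.mp hp).1 z hz')
    have hxnot : x ∉ y :: p' := fun h => lt_irrefl x (hxlt x h)
    simp only [List.mem_cons, not_or] at hxnot
    have c1 : List.filter (fun z => !(x :: r').contains z) (y :: p')
        = List.filter (fun z => !r'.contains z) (y :: p') := by
      apply List.filter_congr; intro z hz
      have : z ≠ x := fun e => lt_irrefl x (e ▸ hxlt z hz)
      simp [this]
    have c2 : List.filter (fun z => !(y :: p').contains z) (x :: r')
        = x :: List.filter (fun z => !(y :: p').contains z) r' := by
      simp [hxnot.1, hxnot.2]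
    have c3 : List.filter (fun z => (y :: p').contains z) (x :: r')
        = List.filter (fun z => (y :: p').contains z) r' := by
      simp [hxnot.1, hxnot.2]
    rw [c1, c2, c3]
    simp
  | case4 accP accR accB x r' y p' hxy hyx ih =>
    intro hr hp
    rw [ih hr (List.pairwise_cons.mp hp).2]
    have hylt : ∀ z ∈ x :: r', y < z := by
      intro z hz
      rcases List.mem_cons.mp hz with rfl | hz'
      · exact hyx
      · exact hyx.trans ((List.pairwise_cons.mp hr).1 z hz')
    have hynot : y ∉ x :: r' := fun h => lt_irrefl y (hylt y h)
    simp only [List.mem_cons, not_or] at hynot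
    have c1 : List.filter (fun z => !(x :: r').contains z) (y :: p')
        = y :: List.filter (fun z => !(x :: r').contains z) p' := by
      simp [hynot.1, hynot.2]
    have c2 : List.filter (fun z => !(y :: p').contains z) (x :: r')
        = List.filter (fun z => !p'.contains z) (x :: r') := by
      apply List.filter_congr; intro z hz
      have : z ≠ y := fun e => lt_irrefl y (e ▸ hylt z hz)
      simp [this]
    have c3 : List.filter (fun z => (y :: p').contains z) (x :: r')
        = List.filter (fun z => p'.contains z) (x :: r') := by
      apply List.filter_congr; intro z hz
      have : z ≠ y := fun e => lt_irrefl y (e ▸ hylt z hz)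
      simp [this]
    rw [c1, c2, c3]
    simp
  | case5 accP accR accB x r' y p' hxy hyx ih =>
    intro hr hp
    have hxy' : x = y := le_antisymm (not_lt.mp hyx) (not_lt.mp hxy)
    subst hxy'
    rw [ih (List.pairwise_cons.mp hr).2 (List.pairwise_cons.mp hp).2]
    have hrlt := (List.pairwise_cons.mp hr).1
    have hplt := (List.pairwise_cons.mp hp).1
    have c1 : List.filter (fun z => !(x :: r').contains z) (x :: p')
        = List.filter (fun z => !r'.contains z) p' := by
      rw [List.filter_cons_of_neg (by simp)]
      apply List.filter_congr; intro z hz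
      have : z ≠ x := fun e => lt_irrefl x (e ▸ hplt z hz)
      simp [this]
    have c2 : List.filter (fun z => !(x :: p').contains z) (x :: r')
        = List.filter (fun z => !p'.contains z) r' := by
      rw [List.filter_cons_of_neg (by simp)]
      apply List.filter_congr; intro z hz
      have : z ≠ x := fun e => lt_irrefl x (e ▸ hrlt z hz)
      simp [this]
    have c3 : List.filter (fun z => (x :: p').contains z) (x :: r')
        = x :: List.filter (fun z => p'.contains z) r' := by
      rw [List.filter_cons_of_pos (by simp)]
      congr 1
      apply List.filter_congr; intro z hz
      have : z ≠ x := fun e => lt_irrefl x (e ▸ hrlt z hz)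
      simp [this]
    rw [c1, c2, c3]
    simp

-- two lists with the same members have pointwise equal `contains`
lemma contains_eq_of_mem_iff (l1 l2 : List String) (h : ∀ a, a ∈ l1 ↔ a ∈ l2) :
    ∀ y, l1.contains y = l2.contains y := by
  intro y
  by_cases hy : y ∈ l1
  · simp [hy, (h y).mp hy]
  · have hy2 : y ∉ l2 := fun hh => hy ((h y).mpr hh)
    simp [hy, hy2]

-- ===== VERDICT (by name: the statement is the Claim_ definition above) =====
theorem reconcile_users_spec : Claim_equal_reconcile_users := by
  intro r p _
  show reconcile_users r p = reconcile_users_alt r p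
  unfold reconcile_users reconcile_users_alt
  by_cases hr : r = []
  · simp [hr]
  · by_cases hp : p = []
    · simp [hr, hp]
    · have hr' : r.isEmpty = false := by simpa [List.isEmpty_iff] using hr
      have hp' : p.isEmpty = false := by simpa [List.isEmpty_iff] using hp
      simp only [hr, hp, if_false, hr', hp', Bool.false_eq_true, false_and]
      rw [reconcile_loop (PySem.Set.ofList r) [] [] (PySem.Set.ofList p)
        (PySem.Set.nodup_ofList r) (PySem.Set.nodup_ofList p) (by simp)]
      simp only [List.nil_append]
      -- B side: reduce the merge to three filters
      have hr1le : (PySem.List.sorted r (fun x => x) false).Pairwise (· ≤ ·) :=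
        PySem.List.sorted_pairwise r (fun x => x)
      have hp1le : (PySem.List.sorted p (fun x => x) false).Pairwise (· ≤ ·) :=
        PySem.List.sorted_pairwise p (fun x => x)
      have hr1 := dedupSorted_pairwise _ hr1le
      have hp1 := dedupSorted_pairwise _ hp1le
      rw [mergeLoop_spec _ _ [] [] [] hr1 hp1]
      simp only [List.reverse_nil, List.nil_append]
      -- membership bridges
      have hrm : ∀ a, a ∈ dedupSorted (PySem.List.sorted r (fun x => x) false) ↔ a ∈ PySem.Set.ofList r := by
        intro a
        rw [dedupSorted_mem, PySem.List.mem_sorted, PySem.Set.mem_ofList]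
      have hpm : ∀ a, a ∈ dedupSorted (PySem.List.sorted p (fun x => x) false) ↔ a ∈ PySem.Set.ofList p := by
        intro a
        rw [dedupSorted_mem, PySem.List.mem_sorted, PySem.Set.mem_ofList]
      have hrperm : (dedupSorted (PySem.List.sorted r (fun x => x) false)).Perm (PySem.Set.ofList r) :=
        (List.perm_ext_iff_of_nodup (hr1.imp ne_of_lt) (PySem.Set.nodup_ofList r)).mpr hrm
      have hpperm : (dedupSorted (PySem.List.sorted p (fun x => x) false)).Perm (PySem.Set.ofList p) :=
        (List.perm_ext_iff_of_nodup (hp1.imp ne_of_lt) (PySem.Set.nodup_ofList p)).mpr hpm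
      have hrc := contains_eq_of_mem_iff _ _ hrm
      have hpc := contains_eq_of_mem_iff _ _ hpm
      -- three components, each by "a strictly increasing permutation IS the sorted list"
      have e1 : PySem.List.sorted (List.filter (fun j => !List.contains (PySem.Set.ofList r) j) (PySem.Set.ofList p)) (fun x => x) false
          = List.filter (fun y => !(dedupSorted (PySem.List.sorted r (fun x => x) false)).contains y) (dedupSorted (PySem.List.sorted p (fun x => x) false)) := by
        apply PySem.List.sorted_eq_of_perm_of_pairwise_lt
        · rw [List.filter_congr (fun z _ => congrArg (fun b => !b) (hrc z))]
          exact hpperm.filter _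
        · exact (hp1.filter _).imp (fun h => h)
      have e2 : PySem.List.sorted (List.filter (fun i => !List.contains (PySem.Set.ofList p) i) (PySem.Set.ofList r)) (fun x => x) false
          = List.filter (fun x => !(dedupSorted (PySem.List.sorted p (fun x => x) false)).contains x) (dedupSorted (PySem.List.sorted r (fun x => x) false)) := by
        apply PySem.List.sorted_eq_of_perm_of_pairwise_lt
        · rw [List.filter_congr (fun z _ => congrArg (fun b => !b) (hpc z))]
          exact hrperm.filter _
        · exact (hr1.filter _).imp (fun h => h)
      have e3 : PySem.List.sorted (List.filter (fun i => List.contains (PySem.Set.ofList p) i) (PySem.Set.ofList r)) (fun x => x) false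
          = List.filter (fun x => (dedupSorted (PySem.List.sorted p (fun x => x) false)).contains x) (dedupSorted (PySem.List.sorted r (fun x => x) false)) := by
        apply PySem.List.sorted_eq_of_perm_of_pairwise_lt
        · rw [List.filter_congr (fun z _ => hpc z)]
          exact hrperm.filter _
        · exact (hr1.filter _).imp (fun h => h)
      rw [e1, e2, e3]
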